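-- pv_equiv track=rewrite | github.com/FreeRTOS/FreeRTOS | .github/scripts/common/header_checker.py | separateHeaderIntoSections
-- ===== SOURCE A (Python) =====
-- def separateHeaderIntoSections(header):
--     """
--     Separate header into text, copyright, and spdx sections.
--     """
--     cur_headers = dict()
--     cur_headers["text"] = []
--     cur_headers["copyright"] = []
--     cur_headers["spdx"] = []
--     for line in header:
--         if "Copyright" in line:
--             cur_headers["copyright"].append(line)
--         elif "SPDX-License-Identifier:" in line:
--             cur_headers["spdx"].append(line)
--         else:
--             cur_headers["text"].append(line)
--     return cur_headers
-- ===== SOURCE B (Python) =====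
-- def separateHeaderIntoSections(header):
--     """
--     Separate header into text, copyright, and spdx sections.
--     """
--     def rank(line):
--         if "Copyright" in line:
--             return 1
--         if "SPDX-License-Identifier:" in line:
--             return 2
--         return 0
--
--     # A stable sort by bucket rank groups the three sections contiguously
--     # while preserving the original order inside each section.
--     ordered = sorted(header, key=rank)
--     ranks = [rank(line) for line in header]
--     n_text = ranks.count(0)
--     n_copyright = ranks.count(1)
--     return {"text": ordered[:n_text],
--             "copyright": ordered[n_text:n_text + n_copyright],
--             "spdx": ordered[n_text + n_copyright:]}
-- ===== Notes on version B (the rewrite author's own statement) =====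
-- stated objective: alternative
-- what changed: Replaces A's single classifying loop that mutates dict buckets by a sort-then-slice algorithm: a stable sort keyed by bucket rank groups the three sections contiguously (preserving in-bucket order), and the result is cut into the three buckets at offsets given by rank counts.
import Mathlib
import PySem

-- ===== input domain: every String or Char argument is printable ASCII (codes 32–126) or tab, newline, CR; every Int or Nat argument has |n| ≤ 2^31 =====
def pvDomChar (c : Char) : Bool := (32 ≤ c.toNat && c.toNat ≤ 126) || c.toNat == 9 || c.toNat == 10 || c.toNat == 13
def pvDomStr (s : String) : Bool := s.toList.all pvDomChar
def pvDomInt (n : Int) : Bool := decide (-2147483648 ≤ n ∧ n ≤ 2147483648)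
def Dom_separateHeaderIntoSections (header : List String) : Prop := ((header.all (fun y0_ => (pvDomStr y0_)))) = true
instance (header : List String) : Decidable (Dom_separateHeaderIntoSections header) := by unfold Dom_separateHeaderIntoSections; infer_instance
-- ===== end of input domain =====

-- B replaces A's classifying dict-mutating loop by sort-then-slice: a stable sort by bucket
-- rank groups the sections contiguously, then rank counts cut the sorted list into the three
-- buckets (objective: alternative; not faster).

-- ===== PORT A =====
def separateHeaderIntoSections (header : List String) : List (String × List String) :=
  let d0 : PySem.Dict String (List String) :=
    (((PySem.Dict.empty).insert "text" []).insert "copyright" []).insert "spdx" []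
  let d := header.foldl (fun d line =>
    if PySem.Str.isIn "Copyright" line then
      d.modify "copyright" [] (· ++ [line])
    else if PySem.Str.isIn "SPDX-License-Identifier:" line then
      d.modify "spdx" [] (· ++ [line])
    else
      d.modify "text" [] (· ++ [line])) d0
  d.items

-- ===== PORT B =====
-- rank of a line: 0 = text, 1 = copyright, 2 = spdx (B's nested-if key function)
def rankB (line : String) : Int :=
  if PySem.Str.isIn "Copyright" line then 1
  else if PySem.Str.isIn "SPDX-License-Identifier:" line then 2
  else 0

def separateHeaderIntoSections_alt (header : List String) : List (String × List String) :=
  let ordered := PySem.List.sorted header rankB false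
  let ranks := header.map rankB
  let nText := PySem.List.count ranks 0
  let nCopyright := PySem.List.count ranks 1
  [("text", PySem.List.slice ordered none (some (nText : Int))),
   ("copyright", PySem.List.slice ordered (some (nText : Int)) (some ((nText : Int) + (nCopyright : Int)))),
   ("spdx", PySem.List.slice ordered (some ((nText : Int) + (nCopyright : Int))) none)]

-- ===== PRECONDITION & SPEC =====
def Spec_separateHeaderIntoSections (header : List String) (out : List (String × List String)) : Prop := out = separateHeaderIntoSections_alt header
instance (header : List String) (out : List (String × List String)) : Decidable (Spec_separateHeaderIntoSections header out) := by unfold Spec_separateHeaderIntoSections; infer_instance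

-- ===== CLAIM (what is proved, stated in full; the proofs are below) =====
def Claim_equal_separateHeaderIntoSections : Prop := ∀ (header : List String), Dom_separateHeaderIntoSections header → Spec_separateHeaderIntoSections header (separateHeaderIntoSections header)

-- ===== LEMMAS AND PROOFS =====

-- invariant of A's loop: each classified line is appended to its bucket, so the final
-- buckets are the initial ones followed by the rank-0/1/2 sublists of the header.
lemma foldl_classify (header : List String) (t c s : List String) :
    (header.foldl (fun d line =>
      if PySem.Str.isIn "Copyright" line then
        d.modify "copyright" [] (· ++ [line])
      else if PySem.Str.isIn "SPDX-License-Identifier:" line then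
        d.modify "spdx" [] (· ++ [line])
      else
        d.modify "text" [] (· ++ [line]))
      (PySem.Dict.mk [("text", t), ("copyright", c), ("spdx", s)])) =
    PySem.Dict.mk
      [("text", t ++ header.filter (fun l => rankB l == 0)),
       ("copyright", c ++ header.filter (fun l => rankB l == 1)),
       ("spdx", s ++ header.filter (fun l => rankB l == 2))] := by
  induction header generalizing t c s with
  | nil => simp
  | cons hd tl ih =>
    rw [List.foldl_cons]
    by_cases h1 : PySem.Str.isIn "Copyright" hd = true
    · rw [if_pos h1]
      have hm : (PySem.Dict.mk [("text", t), ("copyright", c), ("spdx", s)]).modify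
          "copyright" [] (· ++ [hd]) =
          PySem.Dict.mk [("text", t), ("copyright", c ++ [hd]), ("spdx", s)] := by
        simp [PySem.Dict.modify, PySem.Dict.contains, PySem.Dict.get?, PySem.Dict.getD,
          PySem.Dict.insert]
      rw [hm, ih]
      have hr : rankB hd = 1 := by unfold rankB; rw [if_pos h1]
      simp [hr]
    · rw [if_neg h1]
      by_cases h2 : PySem.Str.isIn "SPDX-License-Identifier:" hd = true
      · rw [if_pos h2]
        have hm : (PySem.Dict.mk [("text", t), ("copyright", c), ("spdx", s)]).modify
            "spdx" [] (· ++ [hd]) =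
            PySem.Dict.mk [("text", t), ("copyright", c), ("spdx", s ++ [hd])] := by
          simp [PySem.Dict.modify, PySem.Dict.contains, PySem.Dict.get?, PySem.Dict.getD,
            PySem.Dict.insert]
        rw [hm, ih]
        have hr : rankB hd = 2 := by unfold rankB; rw [if_neg h1, if_pos h2]
        simp [hr]
      · rw [if_neg h2]
        have hm : (PySem.Dict.mk [("text", t), ("copyright", c), ("spdx", s)]).modify
            "text" [] (· ++ [hd]) =
            PySem.Dict.mk [("text", t ++ [hd]), ("copyright", c), ("spdx", s)] := by
          simp [PySem.Dict.modify, PySem.Dict.contains, PySem.Dict.get?, PySem.Dict.getD,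
            PySem.Dict.insert]
        rw [hm, ih]
        have hr : rankB hd = 0 := by unfold rankB; rw [if_neg h1, if_neg h2]
        simp [hr]

lemma rankB_cases (l : String) : rankB l = 0 ∨ rankB l = 1 ∨ rankB l = 2 := by
  unfold rankB; split_ifs <;> simp

-- inserting x into l ++ m where everything in l has rank ≤ rank x and everything in m has
-- rank > rank x puts x exactly between l and m.
lemma insertBy_append (x : String) (l m : List String)
    (hl : ∀ y ∈ l, rankB y ≤ rankB x) (hm : ∀ y ∈ m, rankB x < rankB y) :
    PySem.List.insertBy (fun a b => decide (rankB a < rankB b)) x (l ++ m) = l ++ x :: m := by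
  induction l with
  | nil =>
    cases m with
    | nil => simp [PySem.List.insertBy]
    | cons y ys =>
      have := hm y (by simp)
      simp [PySem.List.insertBy, this]
  | cons z zs ih =>
    have hz : ¬ rankB x < rankB z := not_lt.mpr (hl z (by simp))
    simp only [List.cons_append, PySem.List.insertBy, hz, decide_false]
    exact congrArg (z :: ·) (ih (fun y hy => hl y (by simp [hy])))

-- the insertion-sort fold keeps the three rank segments; each new line lands at the end of
-- its own segment.
lemma foldl_insert_rank (xs : List String) (a0 a1 a2 : List String)
    (h0 : ∀ y ∈ a0, rankB y = 0) (h1 : ∀ y ∈ a1, rankB y = 1) (h2 : ∀ y ∈ a2, rankB y = 2) :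
    xs.foldl (fun acc x => PySem.List.insertBy (fun a b => decide (rankB a < rankB b)) x acc)
      (a0 ++ a1 ++ a2) =
    (a0 ++ xs.filter (fun l => rankB l == 0)) ++ (a1 ++ xs.filter (fun l => rankB l == 1))
      ++ (a2 ++ xs.filter (fun l => rankB l == 2)) := by
  induction xs generalizing a0 a1 a2 with
  | nil => simp
  | cons hd tl ih =>
    rw [List.foldl_cons]
    rcases rankB_cases hd with hr | hr | hr
    · have hins : PySem.List.insertBy (fun a b => decide (rankB a < rankB b)) hd
          (a0 ++ a1 ++ a2) = (a0 ++ [hd]) ++ a1 ++ a2 := by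
        rw [List.append_assoc]
        rw [insertBy_append hd a0 (a1 ++ a2)
          (fun y hy => by rw [h0 y hy, hr])
          (fun y hy => by
            rw [hr]
            rcases List.mem_append.mp hy with h | h
            · rw [h1 y h]; norm_num
            · rw [h2 y h]; norm_num)]
        simp
      rw [hins, ih (a0 ++ [hd]) a1 a2
        (fun y hy => by rcases List.mem_append.mp hy with h | h
                        · exact h0 y h
                        · simp at h; subst h; exact hr) h1 h2]
      simp [hr]
    · have hins : PySem.List.insertBy (fun a b => decide (rankB a < rankB b)) hd
          (a0 ++ a1 ++ a2) = a0 ++ (a1 ++ [hd]) ++ a2 := by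
        rw [insertBy_append hd (a0 ++ a1) a2
          (fun y hy => by
            rw [hr]
            rcases List.mem_append.mp hy with h | h
            · rw [h0 y h]; norm_num
            · rw [h1 y h])
          (fun y hy => by rw [hr, h2 y hy]; norm_num)]
        simp
      rw [hins, ih a0 (a1 ++ [hd]) a2 h0
        (fun y hy => by rcases List.mem_append.mp hy with h | h
                        · exact h1 y h
                        · simp at h; subst h; exact hr) h2]
      simp [hr]
    · have hins : PySem.List.insertBy (fun a b => decide (rankB a < rankB b)) hd
          (a0 ++ a1 ++ a2) = a0 ++ a1 ++ (a2 ++ [hd]) := by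
        have := insertBy_append hd (a0 ++ a1 ++ a2) []
          (fun y hy => by
            rw [hr]
            rcases List.mem_append.mp hy with h | h
            · rcases List.mem_append.mp h with h' | h'
              · rw [h0 y h']; norm_num
              · rw [h1 y h']; norm_num
            · rw [h2 y h])
          (fun y hy => by simp at hy)
        simpa using this
      rw [hins, ih a0 a1 (a2 ++ [hd]) h0 h1
        (fun y hy => by rcases List.mem_append.mp hy with h | h
                        · exact h2 y h
                        · simp at h; subst h; exact hr)]
      simp [hr]

-- the stable sort by rank is exactly the three rank sublists concatenated.
lemma sorted_rank (header : List String) :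
    PySem.List.sorted header rankB false =
      header.filter (fun l => rankB l == 0) ++ header.filter (fun l => rankB l == 1)
        ++ header.filter (fun l => rankB l == 2) := by
  have := foldl_insert_rank header [] [] [] (by simp) (by simp) (by simp)
  simpa [PySem.List.sorted] using this

-- counting a rank in the mapped list counts the lines of that rank.
lemma count_rank (header : List String) (r : Int) :
    PySem.List.count (header.map rankB) r = (header.filter (fun l => rankB l == r)).length := by
  induction header with
  | nil => simp [PySem.List.count]
  | cons hd tl ih =>
    simp only [PySem.List.count, List.map_cons, List.count_cons, List.filter_cons] at *
    by_cases h : rankB hd = r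
    · simp [h, ih]
    · simp [h, ih]

-- ===== VERDICT (by name: the statement is the Claim_ definition above) =====
theorem separateHeaderIntoSections_spec : Claim_equal_separateHeaderIntoSections := by
  intro header _
  show separateHeaderIntoSections header = separateHeaderIntoSections_alt header
  unfold separateHeaderIntoSections separateHeaderIntoSections_alt
  have h0 : (((PySem.Dict.empty).insert "text" ([] : List String)).insert "copyright" []).insert "spdx" [] =
      PySem.Dict.mk [("text", []), ("copyright", []), ("spdx", [])] := by decide
  simp only [h0, foldl_classify, List.nil_append]
  set f0 := header.filter (fun l => rankB l == 0) with hf0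
  set f1 := header.filter (fun l => rankB l == 1) with hf1
  set f2 := header.filter (fun l => rankB l == 2) with hf2
  rw [sorted_rank, count_rank, count_rank, ← hf0, ← hf1, ← hf2]
  have hslice0 : PySem.List.slice (f0 ++ f1 ++ f2) none (some (f0.length : Int)) = f0 := by
    rw [PySem.List.slice_to_natCast]
    rw [List.append_assoc, List.take_left]
  have hslice1 : PySem.List.slice (f0 ++ f1 ++ f2) (some (f0.length : Int))
      (some ((f0.length : Int) + (f1.length : Int))) = f1 := by
    rw [PySem.List.slice_natCast_add]
    rw [List.append_assoc, List.drop_left, List.take_left]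
  have hslice2 : PySem.List.slice (f0 ++ f1 ++ f2) (some ((f0.length : Int) + (f1.length : Int)))
      none = f2 := by
    have hc : ((f0.length : Int) + (f1.length : Int)) = ((f0.length + f1.length : Nat) : Int) := by
      push_cast; ring
    rw [hc, PySem.List.slice_from_natCast]
    rw [← List.length_append, List.drop_left]
  rw [hslice0, hslice1, hslice2]
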